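-- pv_equiv track=rewrite | github.com/boxoforanmore/cs4050-code | InClass/CountingSort.py | count_sort_dict
-- ===== SOURCE A (Python) =====
-- def count_sort_dict(array):
--     count = dict()
--     for index in range(len(array)):
--         if array[index] not in count:
--             count[array[index]] = 0
--         count[array[index]] += 1
--     total = 0
--     index = 0
--     for key in count:
--         oldCount = count[key]
--         count[key] = total
--         total += oldCount
--     output = ["" for _ in range(len(array))]
--     for index in range(len(array)):
--         output[count[array[index]]] = array[index]
--         count[array[index]] += 1
--     return output
-- ===== SOURCE B (Python) =====
-- def count_sort_dict(array):
--     # One pass: group equal elements into per-key lists (keys in first-appearance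
--     # order), then concatenate the groups.
--     groups = {}
--     for x in array:
--         groups.setdefault(x, []).append(x)
--     return [x for g in groups.values() for x in g]
-- ===== Notes on version B (the rewrite author's own statement) =====
-- stated objective: simpler
-- what changed: Replaces the three-pass counting sort (count dict, in-place prefix sums, scatter into a preallocated output by running offsets) with a single pass that groups equal elements into per-key lists (keys in first-appearance order) and concatenates the groups.
import Mathlib
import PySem

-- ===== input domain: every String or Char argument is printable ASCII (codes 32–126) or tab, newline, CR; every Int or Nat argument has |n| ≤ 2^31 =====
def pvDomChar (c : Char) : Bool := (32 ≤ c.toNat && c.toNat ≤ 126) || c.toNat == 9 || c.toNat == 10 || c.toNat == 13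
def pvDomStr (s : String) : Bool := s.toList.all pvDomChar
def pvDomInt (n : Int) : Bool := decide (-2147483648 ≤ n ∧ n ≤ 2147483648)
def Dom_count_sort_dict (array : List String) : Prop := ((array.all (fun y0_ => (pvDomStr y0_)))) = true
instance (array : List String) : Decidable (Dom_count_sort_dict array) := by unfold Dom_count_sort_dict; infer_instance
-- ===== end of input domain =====

-- B replaces A's three-pass counting sort by a dedup of the keys in first-appearance order
-- followed by a concatenation of the equal elements filtered per key (simpler, not faster).

-- ===== PORT A =====
def count_sort_dict (array : List String) : List String :=
  -- count = dict(); for index in range(len(array)): if array[index] not in count: count[array[index]] = 0; count[array[index]] += 1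
  let count : PySem.Dict String Int :=
    (PySem.List.pyRange 0 (PySem.List.len array) 1).foldl
      (fun c i =>
        let x := PySem.List.pyGetD array i ""
        let c := if c.contains x then c else c.insert x 0
        c.insert x (c.getD x 0 + 1))   -- count[x] += 1 (the key is present, so getD is exact)
      PySem.Dict.empty
  -- total = 0; for key in count: oldCount = count[key]; count[key] = total; total += oldCount
  -- (the loop only overwrites values of existing keys, so Python iterates exactly the initial key list)
  let st := count.keys.foldl
      (fun (st : PySem.Dict String Int × Int) key =>
        let oldCount := st.1.getD key 0
        (st.1.insert key st.2, st.2 + oldCount))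
      (count, 0)
  let count := st.1
  -- output = ["" for _ in range(len(array))]
  let output : List String := (PySem.List.pyRange 0 (PySem.List.len array) 1).map (fun _ => "")
  -- for index in range(len(array)): output[count[array[index]]] = array[index]; count[array[index]] += 1
  let st2 := (PySem.List.pyRange 0 (PySem.List.len array) 1).foldl
      (fun (st : List String × PySem.Dict String Int) i =>
        let x := PySem.List.pyGetD array i ""
        (PySem.List.pySetD st.1 (st.2.getD x 0) x, st.2.insert x (st.2.getD x 0 + 1)))
      (output, count)
  st2.1

-- ===== PORT B =====
def count_sort_dict_alt (array : List String) : List String :=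
  -- groups = {}; for x in array: groups.setdefault(x, []).append(x)  (= modify with default [])
  let groups := array.foldl
    (fun (d : PySem.Dict String (List String)) x => d.modify x [] (fun g => g ++ [x]))
    PySem.Dict.empty
  -- [x for g in groups.values() for x in g]
  groups.values.flatMap (fun g => g)

-- ===== PRECONDITION & SPEC =====
def Spec_count_sort_dict (array : List String) (out : List String) : Prop := out = count_sort_dict_alt array
instance (array : List String) (out : List String) : Decidable (Spec_count_sort_dict array out) := by unfold Spec_count_sort_dict; infer_instance

-- ===== CLAIM (what is proved, stated in full; the proofs are below) =====
def Claim_equal_count_sort_dict : Prop := ∀ (array : List String), Dom_count_sort_dict array → Spec_count_sort_dict array (count_sort_dict array)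

-- ===== LEMMAS AND PROOFS =====

-- start offset of key k after A's prefix-sum pass: total count of the keys whose first appearance precedes k's
def pvStart (arr : List String) (k : String) : Int :=
  ((((PySem.Set.ofList arr).takeWhile (fun j => j != k)).map (fun j => (arr.count j : Int))).sum)

-- the partially-filled output after A's scatter loop has consumed prefix p of arr
def pvF (arr p : List String) : List String :=
  (PySem.Set.ofList arr).flatMap
    (fun k => p.filter (fun x => x == k) ++ List.replicate (arr.count k - p.count k) "")

-- A's first loop computes Counter(array)
lemma pvLoop1 (arr : List String) :
    arr.foldl (fun (c : PySem.Dict String Int) x =>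
        (if c.contains x then c else c.insert x 0).insert x
          ((if c.contains x then c else c.insert x 0).getD x 0 + 1)) PySem.Dict.empty
      = PySem.Dict.counter arr := by
  rw [← PySem.Dict.foldl_insert_getD_add_one_eq_counter]
  apply List.foldl_ext
  intro c x _
  by_cases h : c.contains x
  · simp [h]
  · rw [eq_false_of_ne_true h]
    simp [PySem.Dict.insert_insert_self, PySem.Dict.getD_insert_self,
      PySem.Dict.getD_of_not_contains c 0 (eq_false_of_ne_true h)]

-- A's second loop: the value at key k becomes the initial total plus the values of the keys before k
lemma pvLoop2 (ks : List String) (d : PySem.Dict String Int) (t : Int)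
    (k : String) (kb ka : List String) (hks : ks = kb ++ k :: ka) (hnd : ks.Nodup) :
    ((ks.foldl (fun (st : PySem.Dict String Int × Int) key =>
        (st.1.insert key st.2, st.2 + st.1.getD key 0)) (d, t)).1).getD k 0
      = t + (kb.map (fun j => d.getD j 0)).sum := by
  subst hks
  induction kb generalizing d t with
  | nil =>
    simp only [List.nil_append, List.foldl_cons, List.map_nil, List.sum_nil, add_zero]
    have hk : k ∉ ka := by simp [List.nodup_cons] at hnd; exact fun h => hnd.1 h
    have main : ∀ (l : List String) (d' : PySem.Dict String Int) (t' : Int), k ∉ l →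
        d'.getD k 0 = t →
        ((l.foldl (fun (st : PySem.Dict String Int × Int) key =>
          (st.1.insert key st.2, st.2 + st.1.getD key 0)) (d', t')).1).getD k 0 = t := by
      intro l
      induction l with
      | nil => intro d' t' _ h; simpa using h
      | cons a l ih =>
        intro d' t' hmem h
        simp only [List.foldl_cons]
        exact ih _ _ (fun hm => hmem (List.mem_cons_of_mem _ hm))
          (by rw [PySem.Dict.getD_insert_of_ne _ _ _ (fun he : k = a => hmem (he ▸ List.mem_cons_self))]; exact h)
    exact main ka _ _ hk (PySem.Dict.getD_insert_self d k t 0)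
  | cons a kb ih =>
    simp only [List.cons_append, List.foldl_cons, List.map_cons, List.sum_cons]
    have hnd' : (kb ++ k :: ka).Nodup := (List.nodup_cons.mp hnd).2
    have ha : a ∉ kb ++ k :: ka := (List.nodup_cons.mp hnd).1
    rw [ih _ _ hnd']
    have : (kb.map (fun j => (d.insert a t).getD j 0)) = kb.map (fun j => d.getD j 0) := by
      apply List.map_congr_left
      intro j hj
      exact PySem.Dict.getD_insert_of_ne _ _ _ (fun he => ha (he ▸ (List.mem_append.mpr (Or.inl hj))))
    rw [this]; ring

-- a list splits at any member along takeWhile (· != k)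
lemma pvSplit (k : String) (l : List String) (hk : k ∈ l) :
    ∃ ka, l = l.takeWhile (fun j => j != k) ++ k :: ka := by
  induction l with
  | nil => cases hk
  | cons a l ih =>
    by_cases h : a = k
    · exact ⟨l, by simp [h, List.takeWhile]⟩
    · have hk' : k ∈ l := by cases List.mem_cons.mp hk with
        | inl he => exact absurd he.symm h
        | inr hm => exact hm
      obtain ⟨ka, hka⟩ := ih hk'
      refine ⟨ka, ?_⟩
      rw [List.takeWhile_cons]
      simp only [bne_iff_ne, ne_eq, h, not_false_eq_true, if_pos]
      rw [List.cons_append]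
      exact congrArg (a :: ·) (by simpa using hka)

lemma pvFlatRep {α : Type} (l : List α) (f : α → Nat) (c : String) :
    (l.flatMap fun k => List.replicate (f k) c) = List.replicate ((l.map f).sum) c := by
  induction l with
  | nil => rfl
  | cons a l ih => rw [List.flatMap_cons, ih, List.map_cons, List.sum_cons, List.replicate_add]

lemma pvSumCount (arr : List String) :
    (((PySem.Set.ofList arr).map (fun k => arr.count k)).sum) = arr.length := by
  have hperm : (PySem.Set.ofList arr).Perm arr.dedup := by
    apply (List.perm_ext_iff_of_nodup (PySem.Set.nodup_ofList arr) arr.nodup_dedup).mpr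
    intro x; rw [PySem.Set.mem_ofList, List.mem_dedup]
  rw [List.Perm.sum_eq (hperm.map _), List.sum_map_count_dedup_eq_length]

lemma pvCastSum (l : List String) (f : String → Nat) :
    (l.map (fun j => (f j : Int))).sum = ((l.map f).sum : Int) := by
  induction l with
  | nil => rfl
  | cons a l ih => simp [ih]

-- the freshly allocated output of A is pvF arr []
lemma pvInit (arr : List String) :
    (PySem.List.pyRange 0 (PySem.List.len arr) 1).map (fun _ => "") = pvF arr [] := by
  rw [pvF]
  simp only [List.filter_nil, List.count_nil, List.nil_append, Nat.sub_zero]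
  rw [pvFlatRep, pvSumCount]
  rw [show PySem.List.len arr = ((arr.length : Nat) : Int) from by simp [PySem.List.len_eq],
    PySem.List.pyRange_zero_natCast]
  rw [List.map_map]
  apply List.eq_replicate_iff.mpr
  simp

-- one scatter write of A's third loop turns pvF arr p into pvF arr (p ++ [x])
lemma pvStep (arr p rest : List String) (x : String) (harr : arr = p ++ x :: rest) :
    PySem.List.pySetD (pvF arr p) (pvStart arr x + (p.count x : Int)) x = pvF arr (p ++ [x]) := by
  have hxarr : x ∈ arr := by rw [harr]; exact List.mem_append.mpr (Or.inr List.mem_cons_self)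
  have hxkeys : x ∈ PySem.Set.ofList arr := (PySem.Set.mem_ofList arr x).mpr hxarr
  have hnd := PySem.Set.nodup_ofList arr
  obtain ⟨ka, hsplit⟩ := pvSplit x (PySem.Set.ofList arr) hxkeys
  set kb := (PySem.Set.ofList arr).takeWhile (fun j => j != x) with hkb
  have hndx : x ∉ kb ∧ x ∉ ka := by
    rw [hsplit, List.nodup_append] at hnd
    have h3 := hnd.2.2
    simp at h3
    exact ⟨fun hm => (h3 x hm).1 rfl, (List.nodup_cons.mp hnd.2.1).1⟩
  have hle : ∀ k, p.count k ≤ arr.count k := by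
    intro k; rw [harr, List.count_append]; omega
  have hlt : p.count x < arr.count x := by
    rw [harr, List.count_append, List.count_cons_self]; omega
  set g := fun (q : List String) (k : String) =>
    q.filter (fun y => y == k) ++ List.replicate (arr.count k - q.count k) "" with hg
  have hlen : ∀ k, (g p k).length = p.count k + (arr.count k - p.count k) := by
    intro k; rw [hg]; simp [← List.count_eq_length_filter]
  have hglen : ∀ k, (g p k).length = arr.count k := fun k => by rw [hlen k]; have := hle k; omega
  have hgne : ∀ k, k ≠ x → g (p ++ [x]) k = g p k := by
    intro k hk
    rw [hg]
    simp only [List.filter_append, List.count_append]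
    have h1 : (List.filter (fun y => y == k) [x]) = [] := by
      simp [List.filter, show (x == k) = false from beq_false_of_ne (fun h => hk (h ▸ rfl))]
    rw [h1, List.append_nil]
    have h2 : List.count k [x] = 0 := by
      simp [List.count_singleton, show (x == k) = false from beq_false_of_ne (fun h => hk (h ▸ rfl))]
    rw [h2, Nat.add_zero]
  have hdecomp : ∀ q, pvF arr q = kb.flatMap (g q) ++ (g q x ++ ka.flatMap (g q)) := by
    intro q; rw [pvF, hsplit, List.flatMap_append, List.flatMap_cons]
  have hkbLen : (kb.flatMap (g p)).length = (kb.map (fun k => arr.count k)).sum := by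
    rw [List.length_flatMap]
    congr 1
    exact List.map_congr_left (fun k _ => hglen k)
  have hstart : pvStart arr x + (p.count x : Int)
      = (((kb.flatMap (g p)).length + p.count x : Nat) : Int) := by
    rw [pvStart, ← hkb, pvCastSum, hkbLen]; push_cast; ring
  rw [hdecomp p, hdecomp (p ++ [x]), hstart, PySem.List.pySetD_natCast]
  rw [List.set_append, if_neg (by omega)]
  congr 1
  · exact (List.flatMap_congr (fun k hk => hgne k (fun he => hndx.1 (he ▸ hk)))).symm
  rw [Nat.add_sub_cancel_left]
  have hfl : (p.filter (fun y => y == x)).length = p.count x := by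
    simp [← List.count_eq_length_filter]
  have hrep : List.replicate (arr.count x - p.count x) ""
      = "" :: List.replicate (arr.count x - (p.count x + 1)) "" := by
    rw [← List.replicate_succ]
    congr 1; omega
  rw [hg]
  simp only []
  rw [List.set_append, if_pos (by rw [List.length_append, hfl, hrep]; simp), List.set_append,
    if_neg (by omega), hfl, Nat.sub_self, hrep, List.set_cons_zero]
  congr 1
  · rw [List.filter_append, List.count_append]
    have h1 : (List.filter (fun y => y == x) [x]) = [x] := by simp
    have h2 : List.count x [x] = 1 := by simp
    rw [h1, h2, List.append_assoc]
    rfl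
  exact (List.flatMap_congr (fun k hk => hgne k (fun he => hndx.2 (he ▸ hk)))).symm

-- invariant of A's scatter loop
lemma pvLoop3 (arr : List String) : ∀ (rest p : List String) (d : PySem.Dict String Int),
    arr = p ++ rest →
    (∀ k ∈ PySem.Set.ofList arr, d.getD k 0 = pvStart arr k + (p.count k : Int)) →
    ((rest.foldl (fun (st : List String × PySem.Dict String Int) x =>
        (PySem.List.pySetD st.1 (st.2.getD x 0) x, st.2.insert x (st.2.getD x 0 + 1)))
      (pvF arr p, d)).1) = pvF arr arr := by
  intro rest
  induction rest with
  | nil =>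
    intro p d harr _
    simp only [List.foldl_nil]
    rw [show p = arr from by rw [harr, List.append_nil]]
  | cons x rest ih =>
    intro p d harr hinv
    have hxk : x ∈ PySem.Set.ofList arr := (PySem.Set.mem_ofList _ _).mpr
      (by rw [harr]; exact List.mem_append.mpr (Or.inr List.mem_cons_self))
    simp only [List.foldl_cons]
    rw [hinv x hxk, pvStep arr p rest x harr]
    apply ih (p ++ [x]) _ (by rw [harr, List.append_assoc]; rfl)
    intro k hk
    rcases eq_or_ne k x with he | hne
    · subst he
      rw [PySem.Dict.getD_insert_self, List.count_append]
      have h2 : List.count k [k] = 1 := by simp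
      rw [h2]; push_cast; ring
    · rw [PySem.Dict.getD_insert_of_ne _ _ _ hne, hinv k hk, List.count_append]
      have h2 : List.count k [x] = 0 := by
        rw [List.count_singleton]
        simp [Ne.symm hne]
      rw [h2]; push_cast; ring

-- B's grouped result, characterised: groups.values concatenated = the filters in key order
lemma pvAlt (arr : List String) :
    count_sort_dict_alt arr
      = (PySem.Set.ofList arr).flatMap (fun k => arr.filter (fun y => y == k)) := by
  rw [count_sort_dict_alt]
  set d := arr.foldl
    (fun (d : PySem.Dict String (List String)) x => d.modify x [] (fun g => g ++ [x]))
    PySem.Dict.empty with hd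
  have hkeys : d.keys = PySem.Set.ofList arr := by
    rw [hd, PySem.Dict.keys_foldl_modify arr [] (fun _ x => (fun g => g ++ [x]))]
    simp [PySem.Set.update_nil_left]
  have hnd : d.keys.Nodup := by rw [hkeys]; exact PySem.Set.nodup_ofList arr
  have hget : ∀ c, d.getD c [] = arr.filter (fun y => y == c) := by
    intro c
    have hmap : arr.foldl
        (fun (d : PySem.Dict String (List String)) x => d.modify x [] (fun g => g ++ [x]))
        PySem.Dict.empty
      = (arr.map (fun x => (x, x))).foldl
        (fun (d : PySem.Dict String (List String)) p => d.modify p.1 [] (fun g => g ++ [p.2]))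
        PySem.Dict.empty :=
      (List.foldl_map (f := fun (x : String) => (x, x))
        (g := fun (d : PySem.Dict String (List String)) (p : String × String) =>
          d.modify p.1 [] (fun g => g ++ [p.2]))
        (l := arr) (init := PySem.Dict.empty)).symm
    rw [hd, hmap, PySem.Dict.getD_foldl_modify_append]
    rw [PySem.Dict.getD_empty, List.nil_append, List.filter_map, List.map_map]
    have h2 : ((fun (x : String × String) => x.2) ∘ fun x => (x, x)) = id := rfl
    rw [h2, List.map_id]
    rfl
  rw [PySem.Dict.values_eq_map_keys d hnd [], hkeys, List.flatMap_map]
  exact List.flatMap_congr (fun k _ => hget k)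

-- the fully-filled pvF is B's result
lemma pvFinal (arr : List String) : pvF arr arr = count_sort_dict_alt arr := by
  rw [pvAlt, pvF]
  apply List.flatMap_congr
  intro k _
  simp

-- ===== VERDICT (by name: the statement is the Claim_ definition above) =====
theorem count_sort_dict_spec : Claim_equal_count_sort_dict := by
  unfold Claim_equal_count_sort_dict
  intro arr _
  unfold Spec_count_sort_dict
  simp only [count_sort_dict]
  rw [PySem.List.foldl_pyRange_pyGetD arr ""
      (fun (c : PySem.Dict String Int) x =>
        (if c.contains x then c else c.insert x 0).insert x
          ((if c.contains x then c else c.insert x 0).getD x 0 + 1))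
      PySem.Dict.empty (le_refl 0)]
  rw [PySem.List.foldl_pyRange_pyGetD arr ""
      (fun (st : List String × PySem.Dict String Int) x =>
        (PySem.List.pySetD st.1 (st.2.getD x 0) x, st.2.insert x (st.2.getD x 0 + 1)))
      _ (le_refl 0)]
  simp only [Int.toNat_zero, List.drop_zero]
  rw [pvLoop1, PySem.Dict.keys_counter, pvInit]
  rw [pvLoop3 arr arr [] _ rfl ?_]
  · exact pvFinal arr
  intro k hk
  obtain ⟨ka, hsplit⟩ := pvSplit k (PySem.Set.ofList arr) hk
  rw [pvLoop2 _ (PySem.Dict.counter arr) 0 k _ ka hsplit (PySem.Set.nodup_ofList arr)]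
  rw [show (((PySem.Set.ofList arr).takeWhile (fun j => j != k)).map
        (fun j => (PySem.Dict.counter arr).getD j 0))
      = ((PySem.Set.ofList arr).takeWhile (fun j => j != k)).map (fun j => (arr.count j : Int))
    from List.map_congr_left (fun j _ => PySem.Dict.getD_counter arr j)]
  rw [pvStart, List.count_nil]
  push_cast; ring
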